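-- pv_equiv track=rewrite | github.com/blufinLabs/Blufin-Labs-Financials | review_transactions.py | get_category_lists
-- ===== SOURCE A (Python) =====
-- def get_category_lists(account_map):
--     income = []
--     expense = []
--     bs = []
--
--     for name, cfg in account_map.get("categories", {}).items():
--         st = cfg.get("statement_type")
--         if st == "income":
--             income.append(name)
--         elif st == "expense":
--             expense.append(name)
--         elif st in {"asset", "liability", "equity"}:
--             bs.append(name)
--
--     income = [x for x in income if x != "Uncategorized Income"]
--     expense = [x for x in expense if x != "Uncategorized Expense"]
--
--     return sorted(income), sorted(expense), sorted(bs)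
-- ===== SOURCE B (Python) =====
-- def get_category_lists(account_map):
--     items = account_map.get("categories", {}).items()
--     income = sorted(n for n, c in items
--                     if c.get("statement_type") == "income" and n != "Uncategorized Income")
--     expense = sorted(n for n, c in items
--                      if c.get("statement_type") == "expense" and n != "Uncategorized Expense")
--     bs = sorted(n for n, c in items
--                 if c.get("statement_type") in ("asset", "liability", "equity"))
--     return income, expense, bs
-- ===== Notes on version B (the rewrite author's own statement) =====
-- stated objective: simpler
-- what changed: Replaced the single mutable-accumulator dispatch loop plus two post-hoc filtering passes with three independent sorted filtered comprehensions over the items, fusing each name-exclusion into its filter.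
import Mathlib
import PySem

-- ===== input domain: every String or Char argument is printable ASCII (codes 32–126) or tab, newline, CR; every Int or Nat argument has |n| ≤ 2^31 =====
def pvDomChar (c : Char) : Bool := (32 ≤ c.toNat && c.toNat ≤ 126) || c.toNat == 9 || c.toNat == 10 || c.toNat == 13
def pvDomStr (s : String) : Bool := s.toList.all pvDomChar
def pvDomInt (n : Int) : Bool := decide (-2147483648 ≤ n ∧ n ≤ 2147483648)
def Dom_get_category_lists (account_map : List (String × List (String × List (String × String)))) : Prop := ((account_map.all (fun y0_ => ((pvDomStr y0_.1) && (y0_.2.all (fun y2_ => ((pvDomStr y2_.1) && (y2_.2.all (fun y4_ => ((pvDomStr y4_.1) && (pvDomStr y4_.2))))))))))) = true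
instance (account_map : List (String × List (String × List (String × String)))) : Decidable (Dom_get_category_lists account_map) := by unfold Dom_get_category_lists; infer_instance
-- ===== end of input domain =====

-- B replaces A's single dispatch loop with mutable lists and two post-hoc filter passes by
-- three independent sorted filtered comprehensions (objective: simpler); return value only, no mutation.

-- ===== PORT A =====
-- cfg.get("statement_type") for a cfg dict
def pvStA (cfg : List (String × String)) : Option String :=
  (PySem.Dict.ofList cfg).get? "statement_type"

-- the body of A's for-loop, dispatching each (name, cfg) into one of the three accumulators
def pvStepA (acc : List String × List String × List String)
    (p : String × List (String × String)) : List String × List String × List String :=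
  let st := pvStA p.2
  if st = some "income" then (acc.1 ++ [p.1], acc.2.1, acc.2.2)
  else if st = some "expense" then (acc.1, acc.2.1 ++ [p.1], acc.2.2)
  else if st = some "asset" ∨ st = some "liability" ∨ st = some "equity" then
    (acc.1, acc.2.1, acc.2.2 ++ [p.1])
  else acc

def get_category_lists (account_map : List (String × List (String × List (String × String)))) :
    List String × List String × List String :=
  let cats := (PySem.Dict.ofList account_map).getD "categories" []
  let r := (PySem.Dict.ofList cats).items.foldl pvStepA ([], [], [])
  let income := r.1.filter (fun x => x != "Uncategorized Income")
  let expense := r.2.1.filter (fun x => x != "Uncategorized Expense")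
  (PySem.List.sorted income (fun x => x) false,
   PySem.List.sorted expense (fun x => x) false,
   PySem.List.sorted r.2.2 (fun x => x) false)

-- ===== PORT B =====
-- c.get("statement_type") for a cfg dict (B's own helper)
def pvStB (cfg : List (String × String)) : Option String :=
  (PySem.Dict.ofList cfg).get? "statement_type"

def get_category_lists_alt (account_map : List (String × List (String × List (String × String)))) :
    List String × List String × List String :=
  let items := (PySem.Dict.ofList ((PySem.Dict.ofList account_map).getD "categories" [])).items
  (PySem.List.sorted
      ((items.filter (fun p => pvStB p.2 == some "income" && p.1 != "Uncategorized Income")).map (·.1))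
      (fun x => x) false,
   PySem.List.sorted
      ((items.filter (fun p => pvStB p.2 == some "expense" && p.1 != "Uncategorized Expense")).map (·.1))
      (fun x => x) false,
   PySem.List.sorted
      ((items.filter (fun p =>
          pvStB p.2 == some "asset" || pvStB p.2 == some "liability" || pvStB p.2 == some "equity")).map (·.1))
      (fun x => x) false)

-- ===== PRECONDITION & SPEC =====
def Spec_get_category_lists (account_map : List (String × List (String × List (String × String)))) (out : List String × List String × List String) : Prop := out = get_category_lists_alt account_map
instance (account_map : List (String × List (String × List (String × String)))) (out : List String × List String × List String) : Decidable (Spec_get_category_lists account_map out) := by unfold Spec_get_category_lists; infer_instance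

-- ===== CLAIM (what is proved, stated in full; the proofs are below) =====
def Claim_equal_get_category_lists : Prop := ∀ (account_map : List (String × List (String × List (String × String)))), Dom_get_category_lists account_map → Spec_get_category_lists account_map (get_category_lists account_map)

-- ===== LEMMAS AND PROOFS =====

-- A's loop from (i, e, b) appends exactly the three filtered name lists
theorem pv_loop_eq (l : List (String × List (String × String)))
    (i e b : List String) :
    l.foldl pvStepA (i, e, b) =
      (i ++ (l.filter (fun p => pvStA p.2 == some "income")).map (·.1),
       e ++ (l.filter (fun p => pvStA p.2 == some "expense")).map (·.1),
       b ++ (l.filter (fun p =>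
          pvStA p.2 == some "asset" || pvStA p.2 == some "liability" || pvStA p.2 == some "equity")).map (·.1)) := by
  induction l generalizing i e b with
  | nil => simp
  | cons hd tl ih =>
    simp only [List.foldl_cons, List.filter_cons]
    rw [pvStepA]
    by_cases h1 : pvStA hd.2 = some "income"
    · simp [h1, ih]
    · by_cases h2 : pvStA hd.2 = some "expense"
      · simp [h1, h2, ih]
      · by_cases h3 : pvStA hd.2 = some "asset" ∨ pvStA hd.2 = some "liability" ∨ pvStA hd.2 = some "equity"
        · simp only [if_neg h1, if_neg h2, if_pos h3, ih]
          have hb : (pvStA hd.2 == some "asset" || pvStA hd.2 == some "liability" || pvStA hd.2 == some "equity") = true := by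
            rcases h3 with h | h | h <;> simp [h]
          simp [h1, h2, hb]
        · push_neg at h3
          simp [h1, h2, h3.1, h3.2.1, h3.2.2, ih]

-- mapping names then filtering on the name = filtering the combined predicate then mapping
theorem pv_filter_map_fst {α β : Type} (p : α × β → Bool) (q : α → Bool)
    (l : List (α × β)) :
    ((l.filter p).map (·.1)).filter q = (l.filter (fun x => p x && q x.1)).map (·.1) := by
  induction l with
  | nil => rfl
  | cons hd tl ih =>
    by_cases hp : p hd = true
    · by_cases hq : q hd.1 = true
      · simp [List.filter_cons, hp, hq, ih]
      · simp [List.filter_cons, hp, hq, ih]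
    · simp [List.filter_cons, hp, ih]

-- ===== VERDICT (by name: the statement is the Claim_ definition above) =====
theorem get_category_lists_spec : Claim_equal_get_category_lists := by
  intro account_map _
  unfold Spec_get_category_lists get_category_lists get_category_lists_alt
  simp only [pv_loop_eq, List.nil_append, pv_filter_map_fst]
  rfl
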